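-- pv_equiv track=rewrite | github.com/tomas-skalicky/interview_puzzles | src/main/python/com/skalicky/python/interviewpuzzles/check_if_words_can_create_a_domino_circle.py | chained_words
-- ===== SOURCE A (Python) =====
-- from typing import List, Dict
--
-- def chained_words(words: List[str]):
--     if len(words) < 2:
--         return False
--     else:
--         words_by_first_letters: Dict[str, List[str]] = dict()
--         words_by_last_letters: Dict[str, List[str]] = dict()
--         for word in words:
--             first_letter: str = word[0]
--             if not words_by_first_letters.__contains__(first_letter):
--                 words_by_first_letters[first_letter] = list()
--             words_by_first_letters[first_letter].append(word)
--             last_letter: str = word[len(word) - 1]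
--             if not words_by_last_letters.__contains__(last_letter):
--                 words_by_last_letters[last_letter] = list()
--             words_by_last_letters[last_letter].append(word)
--         for first_letter in words_by_first_letters.keys():
--             words_with_first_letter: List[str] = words_by_first_letters[first_letter]
--             # Three conditions need to be fulfilled:
--             # 1) For each letter appearing as the first letter in a word: there needs to be a word or words having
--             #    this letter as the last letter.
--             # 2) For each letter appearing as the first letter in a world: the number of occurrences of this letter
--             #    as the first letter in a word needs to be equal to the number of occurrences of this letter
--             #    as the last letter in a word. In order words, we need to have pairs.
--             #    Note: the condition 1) and 2) implies the inverse implication of the condition 1).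
--             # 3) If there is only one occurrence of a particular letter we need to avoid false positives that a letter
--             #    would create a circle with itself, i.e. starting and ending with the same letter.
--             if not words_by_last_letters.__contains__(first_letter) or len(words_by_last_letters[first_letter]) != len(
--                     words_with_first_letter) or (len(words_with_first_letter) == 1 and words_with_first_letter[0] ==
--                                                  words_by_last_letters[first_letter][0]):
--                 return False
--         return True
-- ===== SOURCE B (Python) =====
-- from typing import List
--
-- def chained_words(words: List[str]):
--     if len(words) < 2:
--         return False
--     # degree balance: the multiset of first letters must equal the multiset of last letters
--     if sorted(w[0] for w in words) != sorted(w[-1] for w in words):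
--         return False
--     # a letter that starts exactly one word must not close a circle with itself
--     for w in words:
--         if w[0] == w[-1] and sum(1 for u in words if u[0] == w[0]) == 1:
--             return False
--     return True
-- ===== Notes on version B (the rewrite author's own statement) =====
-- stated objective: alternative
-- what changed: B drops A's dictionaries entirely: degree balance is checked by comparing the sorted lists of first letters and last letters (multiset equality via sorting), and the lone-self-loop case by a direct scan counting words with the same first letter.
import Mathlib
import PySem

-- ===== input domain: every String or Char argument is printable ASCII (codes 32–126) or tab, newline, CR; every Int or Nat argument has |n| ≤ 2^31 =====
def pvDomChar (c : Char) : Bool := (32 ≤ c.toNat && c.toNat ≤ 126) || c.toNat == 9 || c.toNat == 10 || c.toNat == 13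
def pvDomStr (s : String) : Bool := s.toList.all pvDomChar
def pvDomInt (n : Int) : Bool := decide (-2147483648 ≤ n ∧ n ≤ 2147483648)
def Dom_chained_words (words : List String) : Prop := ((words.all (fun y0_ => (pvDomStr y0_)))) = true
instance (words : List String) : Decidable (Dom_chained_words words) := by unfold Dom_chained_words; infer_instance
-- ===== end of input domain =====

-- B replaces A's per-letter dictionaries of word lists and the per-key comparison loop by
-- sorting the first-letter and last-letter lists and comparing them, plus a direct counting
-- scan for the lone-self-loop case (objective: alternative algorithm, no dictionaries).

-- ===== PORT A =====
-- word[0]: Python raises IndexError on an empty word; that case is excluded by Pre_ (the `getD ' '` is never reached there)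
def pvFirst (w : String) : Char := (PySem.Str.pyGet? w 0).getD ' '
-- word[len(word) - 1]: same remark
def pvLastA (w : String) : Char := (PySem.Str.pyGet? w (PySem.Str.len w - 1)).getD ' '

def chained_words (words : List String) : Bool :=
  if words.length < 2 then false
  else
    -- one loop filling both dicts: "if not contains: d[k] = []" is the insert, ".append(word)" the modify
    let p := words.foldl
      (fun (p : PySem.Dict Char (List String) × PySem.Dict Char (List String)) word =>
        ((if p.1.contains (pvFirst word) then p.1 else p.1.insert (pvFirst word) []).modify
            (pvFirst word) [] (fun l => l ++ [word]),
         (if p.2.contains (pvLastA word) then p.2 else p.2.insert (pvLastA word) []).modify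
            (pvLastA word) [] (fun l => l ++ [word])))
      (PySem.Dict.empty, PySem.Dict.empty)
    -- for first_letter in keys: return False on the flagged condition (early return = List.all);
    -- the getD/pyGet? defaults are never reached: the keys are present and the lists nonempty
    p.1.keys.all (fun c =>
      !(!(p.2.contains c) || ((p.2.getD c []).length != (p.1.getD c []).length) ||
        ((p.1.getD c []).length == 1 &&
          (PySem.List.pyGet? (p.1.getD c []) 0).getD "" ==
            (PySem.List.pyGet? (p.2.getD c []) 0).getD "")))

-- ===== PORT B =====
-- word[-1]: Python raises IndexError on an empty word; excluded by Pre_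
def pvLastB (w : String) : Char := (PySem.Str.pyGet? w (-1)).getD ' '

def chained_words_alt (words : List String) : Bool :=
  if words.length < 2 then false
  else if !(PySem.List.sorted (words.map pvFirst) (fun x => x)
              == PySem.List.sorted (words.map pvLastB) (fun x => x)) then false
  else
    -- for w in words: the early return is List.all; sum(1 for u in words if …) is the foldl
    words.all (fun w =>
      !(pvFirst w == pvLastB w &&
        (words.foldl (fun acc u => if pvFirst u == pvFirst w then acc + 1 else acc) (0 : Int)) == 1))

-- ===== PRECONDITION & SPEC =====
-- Pre_ excludes only the inputs where A raises IndexError: an empty word while len(words) ≥ 2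
-- (with len(words) < 2 the guard returns False before any word is indexed).
def Pre_chained_words (words : List String) : Prop :=
  words.length < 2 ∨ ∀ w ∈ words, w ≠ ""
instance (words : List String) : Decidable (Pre_chained_words words) := by
  unfold Pre_chained_words; infer_instance
def pvWitness_chained_words : List String := ["ab", "ba"]

def Spec_chained_words (words : List String) (out : Bool) : Prop := out = chained_words_alt words
instance (words : List String) (out : Bool) : Decidable (Spec_chained_words words out) := by
  unfold Spec_chained_words; infer_instance

-- ===== CLAIM (what is proved, stated in full; the proofs are below) =====
def Claim_equal_chained_words : Prop := ∀ (words : List String), Dom_chained_words words →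
  Pre_chained_words words → Spec_chained_words words (chained_words words)

-- ===== LEMMAS AND PROOFS =====

-- on a nonempty word, word[len(word)-1] (A) and word[-1] (B) are the same character
theorem pvLast_eq (w : String) (h : w ≠ "") : pvLastA w = pvLastB w := by
  have hl : 0 < w.toList.length := by
    by_contra hc
    exact h (String.toList_eq_nil_iff.mp (List.eq_nil_of_length_eq_zero (by omega)))
  unfold pvLastA pvLastB
  congr 1
  simp only [PySem.Str.pyGet?, PySem.Str.len, PySem.Chars.pyGet?, PySem.List.pyGet?,
    PySem.List.pyIdx?]
  rw [if_pos (by omega), if_pos (by omega), if_neg (by omega), if_pos (by omega)]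
  simp only [Option.bind_some]
  congr 1
  omega

-- A's grouping loop, as a standalone function of the key map
def pvGroup (f : String → Char) (ws : List String) : PySem.Dict Char (List String) :=
  ws.foldl
    (fun d w => (if d.contains (f w) then d else d.insert (f w) []).modify
      (f w) [] (fun l => l ++ [w]))
    PySem.Dict.empty

theorem pvGroup_step {κ ν : Type} [BEq κ] [LawfulBEq κ] (d : PySem.Dict κ (List ν)) (c : κ) (w : ν) :
    (if d.contains c then d else d.insert c []).modify c [] (fun l => l ++ [w])
      = d.modify c [] (fun l => l ++ [w]) := by
  by_cases h : d.contains c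
  · rw [if_pos h]
  · rw [if_neg h]
    simp only [PySem.Dict.modify, PySem.Dict.getD_insert_self, PySem.Dict.insert_insert_self,
      PySem.Dict.getD_of_not_contains (h := by simpa using h)]

theorem pvGroup_getD (f : String → Char) (ws : List String) (c : Char) :
    (pvGroup f ws).getD c [] = ws.filter (fun w => f w == c) := by
  unfold pvGroup
  simp only [pvGroup_step]
  have h := PySem.Dict.getD_foldl_modify_append (ws.map (fun w => (f w, w))) PySem.Dict.empty c
  rw [List.foldl_map] at h
  simp only [PySem.Dict.getD_empty, List.nil_append, List.filter_map, Function.comp_def] at h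
  simpa [List.map_filter, Function.comp_def] using h

theorem pvGroup_keys (f : String → Char) (ws : List String) :
    (pvGroup f ws).keys = PySem.Set.ofList (ws.map f) := by
  unfold pvGroup
  simp only [pvGroup_step]
  rw [PySem.Dict.keys_foldl_modify_key ws f [] (fun _ w l => l ++ [w])]
  simp [PySem.Set.update_nil_left, PySem.Dict.keys_empty]

theorem pvGroup_contains (f : String → Char) (ws : List String) (c : Char) :
    (pvGroup f ws).contains c = decide (c ∈ ws.map f) := by
  rw [PySem.Dict.contains_eq_decide_mem_keys, pvGroup_keys]
  simp [PySem.Set.mem_ofList]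

-- degree counting: if the first-letter multiset agrees with the last-letter multiset on every
-- first letter, the two multisets are equal (they have the same size)
theorem pvCounts_all (xs ys : List Char) (hlen : xs.length = ys.length)
    (h : ∀ c ∈ xs, xs.count c = ys.count c) : ∀ c, xs.count c = ys.count c := by
  have hle : (xs : Multiset Char) ≤ (ys : Multiset Char) := by
    rw [Multiset.le_iff_count]
    intro a
    by_cases ha : a ∈ xs
    · simp [h a ha]
    · simp [List.count_eq_zero_of_not_mem ha]
  have := Multiset.eq_of_le_of_card_le hle (by simpa using hlen.ge)
  intro c
  have := congrArg (Multiset.count c) this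
  simpa using this

theorem pvCount_map (f : String → Char) (ws : List String) (c : Char) :
    (ws.map f).count c = (ws.filter (fun w => f w == c)).length := by
  rw [List.count_eq_countP, List.countP_map, List.countP_eq_length_filter]
  rfl

-- B's counting scan is the length of A's per-letter filter, as an Int
theorem pvFoldCount (ws : List String) (c : Char) :
    ws.foldl (fun acc u => if pvFirst u == c then acc + 1 else acc) (0 : Int)
      = ((ws.filter (fun w => pvFirst w == c)).length : Int) := by
  induction ws using List.reverseRecOn with
  | nil => simp
  | append_singleton xs x ih =>
    rw [List.foldl_append, List.filter_append, List.foldl_cons, List.foldl_nil, ih]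
    by_cases h : pvFirst x == c <;> simp [h]

theorem pvSingleton {α : Type} {l : List α} (h : l.length = 1) {w : α} (hw : w ∈ l) : l = [w] := by
  obtain ⟨a, rfl⟩ := List.length_eq_one_iff.mp h
  simp only [List.mem_singleton] at hw
  rw [hw]

theorem pvMain (ws : List String) (h2 : ¬ ws.length < 2) (hne : ∀ w ∈ ws, w ≠ "") :
    chained_words ws = chained_words_alt ws := by
  have hmap : ws.map pvLastB = ws.map pvLastA :=
    List.map_congr_left (fun w hw => (pvLast_eq w (hne w hw)).symm)
  simp only [chained_words, chained_words_alt, if_neg h2]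
  rw [PySem.List.foldl_prod_mk
        (f := fun (d : PySem.Dict Char (List String)) (word : String) =>
          (if d.contains (pvFirst word) then d else d.insert (pvFirst word) []).modify
            (pvFirst word) [] (fun l => l ++ [word]))
        (g := fun (d : PySem.Dict Char (List String)) (word : String) =>
          (if d.contains (pvLastA word) then d else d.insert (pvLastA word) []).modify
            (pvLastA word) [] (fun l => l ++ [word]))]
  have gF : List.foldl (fun (d : PySem.Dict Char (List String)) (w : String) =>
      (if d.contains (pvFirst w) then d else d.insert (pvFirst w) []).modify
        (pvFirst w) [] (fun l => l ++ [w])) PySem.Dict.empty ws = pvGroup pvFirst ws := rfl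
  have gL : List.foldl (fun (d : PySem.Dict Char (List String)) (w : String) =>
      (if d.contains (pvLastA w) then d else d.insert (pvLastA w) []).modify
        (pvLastA w) [] (fun l => l ++ [w])) PySem.Dict.empty ws = pvGroup pvLastA ws := rfl
  simp only []
  rw [gF, gL, hmap]
  -- B's sorted-lists test is multiset (count) equality
  have hsorted : (PySem.List.sorted (ws.map pvFirst) (fun x => x)
        == PySem.List.sorted (ws.map pvLastA) (fun x => x)) = true ↔
      ∀ c, (ws.map pvFirst).count c = (ws.map pvLastA).count c := by
    rw [beq_iff_eq, PySem.List.sorted_id_eq_sorted_id_iff_perm, List.perm_iff_count]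
  rw [Bool.eq_iff_iff, List.all_eq_true]
  simp only [pvGroup_keys, PySem.Set.mem_ofList, pvGroup_getD, pvGroup_contains,
    Bool.not_eq_eq_eq_not, Bool.not_not, Bool.and_eq_true, Bool.not_or, Bool.not_true,
    bne_eq_false_iff_eq, Bool.and_eq_false_iff, beq_eq_false_iff_ne, decide_eq_true_eq, ne_eq]
  constructor
  · intro hA
    have h1 : ∀ c ∈ ws.map pvFirst, (ws.map pvFirst).count c = (ws.map pvLastA).count c := by
      intro c hc
      rw [pvCount_map, pvCount_map]
      exact (hA c hc).1.2.symm
    have hall : ∀ c, (ws.map pvFirst).count c = (ws.map pvLastA).count c :=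
      pvCounts_all _ _ (by simp) h1
    have hs := beq_iff_eq.mp (hsorted.mpr hall)
    rw [if_neg (by simpa using hs)]
    rw [List.all_eq_true]
    intro w hw
    simp only [Bool.not_eq_eq_eq_not, Bool.not_true, Bool.and_eq_false_iff,
      beq_eq_false_iff_ne, ne_eq, pvFoldCount]
    by_cases heq : pvFirst w = pvLastB w
    · right
      intro hcnt
      have hcnt' : (ws.filter (fun u => pvFirst u == pvFirst w)).length = 1 := by
        exact_mod_cast hcnt
      set c := pvFirst w with hc
      have hcm : c ∈ ws.map pvFirst := List.mem_map_of_mem hw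
      obtain ⟨⟨hcin, hlen⟩, hnot⟩ := hA c hcm
      have hwF : w ∈ ws.filter (fun u => pvFirst u == c) :=
        List.mem_filter.mpr ⟨hw, by simp [← hc]⟩
      have hFeq : ws.filter (fun u => pvFirst u == c) = [w] := pvSingleton hcnt' hwF
      have hLA : pvLastA w = c := by rw [pvLast_eq w (hne w hw), ← heq]
      have hwL : w ∈ ws.filter (fun u => pvLastA u == c) :=
        List.mem_filter.mpr ⟨hw, by simp [hLA]⟩
      have hLeq : ws.filter (fun u => pvLastA u == c) = [w] :=
        pvSingleton (by rw [hlen, hcnt']) hwL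
      rcases hnot with h | h
      · exact h hcnt'
      · exact h (by rw [hFeq, hLeq])
    · exact Or.inl heq
  · intro hB
    by_cases hd : (PySem.List.sorted (ws.map pvFirst) (fun x => x)
        == PySem.List.sorted (ws.map pvLastA) (fun x => x)) = true
    · rw [if_neg (by simpa using beq_iff_eq.mp hd)] at hB
      have hall := hsorted.mp hd
      have hQ := List.all_eq_true.mp hB
      intro c hc
      refine ⟨⟨?_, ?_⟩, ?_⟩
      · have : 0 < (ws.map pvLastA).count c := by
          rw [← hall c]; exact List.count_pos_iff.mpr hc
        exact List.count_pos_iff.mp this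
      · rw [← pvCount_map, ← pvCount_map]
        exact (hall c).symm
      · by_cases hlen1 : (ws.filter (fun w => pvFirst w == c)).length = 1
        · right
          intro hheads
          obtain ⟨a, ha⟩ := List.length_eq_one_iff.mp hlen1
          have haw : a ∈ ws ∧ pvFirst a = c := by
            have := List.mem_filter.mp (ha ▸ List.mem_singleton_self a)
            exact ⟨this.1, by simpa using this.2⟩
          have hlenL : (ws.filter (fun w => pvLastA w == c)).length = 1 := by
            rw [← pvCount_map, ← hall c, pvCount_map, hlen1]
          obtain ⟨b, hb⟩ := List.length_eq_one_iff.mp hlenL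
          have hbw : b ∈ ws ∧ pvLastA b = c := by
            have := List.mem_filter.mp (hb ▸ List.mem_singleton_self b)
            exact ⟨this.1, by simpa using this.2⟩
          have hab : a = b := by
            rw [ha, hb] at hheads
            simpa [pysem] using hheads
          have := hQ a haw.1
          simp only [Bool.not_eq_eq_eq_not, Bool.not_true, Bool.and_eq_false_iff,
            beq_eq_false_iff_ne, ne_eq, pvFoldCount] at this
          rcases this with h | h
          · exact h (by rw [haw.2, ← pvLast_eq a (hne a haw.1), hab, hbw.2])
          · apply h
            rw [haw.2, hlen1]
            norm_num
        · left
          exact hlen1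
    · rw [if_pos (by simpa using hd)] at hB
      exact absurd hB (by simp)

-- ===== VERDICT (by name: the statement is the Claim_ definition above) =====
theorem chained_words_spec : Claim_equal_chained_words := by
  intro words _ hpre
  unfold Spec_chained_words
  by_cases h2 : words.length < 2
  · simp only [chained_words, chained_words_alt, if_pos h2]
  · exact pvMain words h2 (hpre.resolve_left h2)
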